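-- pv_equiv track=rewrite | github.com/21david/LeetCode-solutions | Python/Medium/Maximal Range That Each Element Is Maximum in It.py | maximumLengthOfRanges
-- ===== SOURCE A (Python) =====
-- from typing import List
--
-- def maximumLengthOfRanges(nums: List[int]) -> List[int]:
--     N = len(nums)
--
--     def next_greater_array(arr, val):
--         res = [val] * len(arr)
--         st = []
--         for i in range(len(arr)):
--             while st and arr[i] > arr[st[-1]]:
--                 # Current num maybe bigger than many, so update all those indices
--                 res[st.pop()] = i
--             st.append(i)
--         return res
--
--     ltr = next_greater_array(nums, N)
--
--     rtl = list(reversed(next_greater_array(nums[::-1], -1)))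
--     rtl = [(N-1) - rtl[i] if rtl[i] >= 0 else -1 for i in range(N)]
--
--     return [ltr[i] - rtl[i] - 1 for i in range(N)]
-- ===== SOURCE B (Python) =====
-- from typing import List
--
-- def maximumLengthOfRanges(nums: List[int]) -> List[int]:
--     N = len(nums)
--     res = []
--     for i in range(N):
--         v = nums[i]
--         l = i
--         while l - 1 >= 0 and nums[l - 1] <= v:
--             l -= 1
--         r = i
--         while r + 1 < N and nums[r + 1] <= v:
--             r += 1
--         res.append(r - l + 1)
--     return res
-- ===== Notes on version B (the rewrite author's own statement) =====
-- stated objective: simpler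
-- what changed: Replaced the two monotonic-stack next-greater passes (plus the reverse/remap bookkeeping) by a direct per-index outward expansion: from each index walk left and right while neighbours are <= nums[i] and report the window length.
import Mathlib
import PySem

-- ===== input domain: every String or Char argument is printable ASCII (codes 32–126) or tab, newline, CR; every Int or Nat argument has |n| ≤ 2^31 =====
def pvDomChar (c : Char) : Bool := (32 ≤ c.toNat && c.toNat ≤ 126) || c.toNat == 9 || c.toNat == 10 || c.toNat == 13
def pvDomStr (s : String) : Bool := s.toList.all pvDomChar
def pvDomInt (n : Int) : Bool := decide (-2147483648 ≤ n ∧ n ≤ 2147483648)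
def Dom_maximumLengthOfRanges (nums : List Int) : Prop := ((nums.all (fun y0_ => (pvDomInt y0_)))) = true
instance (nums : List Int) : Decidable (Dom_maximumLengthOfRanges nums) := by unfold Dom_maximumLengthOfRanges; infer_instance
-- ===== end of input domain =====

-- B replaces A's two monotonic-stack passes by a direct outward expansion from each index (simpler, O(N^2) vs A's O(N)); return values proved equal on all inputs.

-- ===== PORT A =====
-- inner 'while st and arr[i] > arr[st[-1]]: res[st.pop()] = i' loop; stack top = list head.
-- All list indices here (i and the stack entries) are produced by 'range(len(arr))', hence
-- nonnegative and in range, where List.getD/List.set coincide exactly with Python indexing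
-- (PySem.List.pyGetD_natCast / pySetD_natCast).
def pvPop (arr : List Int) (i : Nat) (res : List Int) (st : List Nat) : List Int × List Nat :=
  match st with
  | [] => (res, [])
  | t :: rest =>
    if arr.getD t 0 < arr.getD i 0 then
      pvPop arr i (res.set t (i : Int)) rest
    else (res, t :: rest)

-- next_greater_array(arr, val): 'for i in range(len(arr))' over state (res, st)
def pvNga (arr : List Int) (val : Int) : List Int :=
  ((List.range arr.length).foldl
    (fun (s : List Int × List Nat) i =>
      let p := pvPop arr i s.1 s.2
      (p.1, i :: p.2))
    (List.replicate arr.length val, [])).1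

def maximumLengthOfRanges (nums : List Int) : List Int :=
  let N := nums.length
  let ltr := pvNga nums (N : Int)
  -- nums[::-1]
  let rev := (PySem.List.slice? nums none none (-1)).getD []
  -- list(reversed(next_greater_array(nums[::-1], -1)))
  let rtl0 := (pvNga rev (-1)).reverse
  -- [(N-1) - rtl[i] if rtl[i] >= 0 else -1 for i in range(N)]
  let rtl := (List.range N).map (fun i =>
      if 0 ≤ rtl0.getD i 0 then ((N : Int) - 1) - rtl0.getD i 0 else -1)
  (List.range N).map (fun i => ltr.getD i 0 - rtl.getD i 0 - 1)

-- ===== PORT B =====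
-- 'l = i; while l - 1 >= 0 and nums[l-1] <= v: l -= 1'
def pvExpandL (nums : List Int) (v : Int) : Nat → Nat
  | 0 => 0
  | l + 1 => if nums.getD l 0 ≤ v then pvExpandL nums v l else l + 1

-- 'r = i; while r + 1 < N and nums[r+1] <= v: r += 1'
def pvExpandR (nums : List Int) (v : Int) (r : Nat) : Nat :=
  if _h : r + 1 < nums.length then
    if nums.getD (r + 1) 0 ≤ v then pvExpandR nums v (r + 1) else r
  else r
termination_by nums.length - r
decreasing_by omega

def maximumLengthOfRanges_alt (nums : List Int) : List Int :=
  (List.range nums.length).foldl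
    (fun res i =>
      let v := nums.getD i 0
      let l := pvExpandL nums v i
      let r := pvExpandR nums v i
      res ++ [(r : Int) - (l : Int) + 1])
    []

-- ===== PRECONDITION & SPEC =====
def Spec_maximumLengthOfRanges (nums : List Int) (out : List Int) : Prop := out = maximumLengthOfRanges_alt nums
instance (nums : List Int) (out : List Int) : Decidable (Spec_maximumLengthOfRanges nums out) := by unfold Spec_maximumLengthOfRanges; infer_instance

-- ===== CLAIM (what is proved, stated in full; the proofs are below) =====
def Claim_equal_maximumLengthOfRanges : Prop := ∀ (nums : List Int), Dom_maximumLengthOfRanges nums → Spec_maximumLengthOfRanges nums (maximumLengthOfRanges nums)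

-- ===== LEMMAS AND PROOFS =====

-- k is the first index after j carrying a strictly greater value
def pvIsFirst (arr : List Int) (j k : Nat) : Prop :=
  j < k ∧ k < arr.length ∧ arr.getD j 0 < arr.getD k 0 ∧
    ∀ m, j < m → m < k → arr.getD m 0 ≤ arr.getD j 0

-- no strictly greater value after j
def pvNoGtR (arr : List Int) (j : Nat) : Prop :=
  ∀ k, j < k → k < arr.length → arr.getD k 0 ≤ arr.getD j 0

-- k is the last index before i carrying a strictly greater value
def pvIsLast (arr : List Int) (i k : Nat) : Prop :=
  k < i ∧ arr.getD i 0 < arr.getD k 0 ∧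
    ∀ m, k < m → m < i → arr.getD m 0 ≤ arr.getD i 0

-- state of A's loop after the first n indices
def pvNgaState (arr : List Int) (val : Int) (n : Nat) : List Int × List Nat :=
  (List.range n).foldl
    (fun (s : List Int × List Nat) i =>
      let p := pvPop arr i s.1 s.2
      (p.1, i :: p.2))
    (List.replicate arr.length val, [])

def pvSetAll (res : List Int) (i : Nat) (l : List Nat) : List Int :=
  l.foldl (fun r t => r.set t (i : Int)) res

-- loop invariant of A's stack pass
def pvInv (arr : List Int) (val : Int) (n : Nat) (res : List Int) (st : List Nat) : Prop :=
  res.length = arr.length ∧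
  (∀ t ∈ st, t < n) ∧
  st.Pairwise (· > ·) ∧
  st.Pairwise (fun a b => arr.getD a 0 ≤ arr.getD b 0) ∧
  (∀ j, j < n → (j ∈ st ↔ ∀ k, j < k → k < n → arr.getD k 0 ≤ arr.getD j 0)) ∧
  (∀ j ∈ st, res.getD j 0 = val) ∧
  (∀ j, n ≤ j → j < arr.length → res.getD j 0 = val) ∧
  (∀ j, j < n → j ∉ st → ∃ k, j < k ∧ k < n ∧ arr.getD j 0 < arr.getD k 0 ∧
      (∀ m, j < m → m < k → arr.getD m 0 ≤ arr.getD j 0) ∧ res.getD j 0 = (k : Int))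

theorem pvPop_eq (arr : List Int) (i : Nat) (res : List Int) (st : List Nat) :
    pvPop arr i res st =
      (pvSetAll res i (st.takeWhile (fun t => decide (arr.getD t 0 < arr.getD i 0))),
       st.dropWhile (fun t => decide (arr.getD t 0 < arr.getD i 0))) := by
  induction st generalizing res with
  | nil => simp only [pvPop, pvSetAll, List.takeWhile_nil, List.dropWhile_nil, List.foldl_nil]
  | cons t rest ih =>
    simp only [pvPop, List.takeWhile_cons, List.dropWhile_cons, decide_eq_true_eq]
    by_cases h : arr.getD t 0 < arr.getD i 0
    · rw [if_pos h, if_pos h, if_pos h, ih]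
      simp only [pvSetAll, List.foldl_cons]
    · rw [if_neg h, if_neg h, if_neg h]
      simp only [pvSetAll, List.foldl_nil]

theorem pvSetAll_length (res : List Int) (i : Nat) (l : List Nat) :
    (pvSetAll res i l).length = res.length := by
  induction l generalizing res with
  | nil => rfl
  | cons t rest ih => simp [pvSetAll, List.foldl_cons] at ih ⊢; rw [ih, List.length_set]

theorem pvSetAll_getD_not_mem (res : List Int) (i : Nat) (l : List Nat) (j : Nat)
    (hj : j ∉ l) : (pvSetAll res i l).getD j 0 = res.getD j 0 := by
  induction l generalizing res with
  | nil => rfl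
  | cons t rest ih =>
    simp only [List.mem_cons, not_or] at hj
    simp only [pvSetAll, List.foldl_cons] at ih ⊢
    rw [ih _ hj.2, List.getD_eq_getElem?_getD, List.getD_eq_getElem?_getD,
      List.getElem?_set_ne (by omega)]

theorem pvSetAll_getD_mem (res : List Int) (i : Nat) (l : List Nat) (j : Nat)
    (hnd : l.Nodup) (hj : j ∈ l) (hlt : j < res.length) :
    (pvSetAll res i l).getD j 0 = (i : Int) := by
  induction l generalizing res with
  | nil => simp at hj
  | cons t rest ih =>
    simp only [pvSetAll, List.foldl_cons] at ih ⊢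
    rcases List.mem_cons.mp hj with h | h
    · subst h
      have hnot : j ∉ rest := (List.nodup_cons.mp hnd).1
      have := pvSetAll_getD_not_mem (res.set j (i : Int)) i rest j hnot
      simp only [pvSetAll] at this
      rw [this, List.getD_eq_getElem?_getD, List.getElem?_set_self hlt]
      rfl
    · exact ih (res.set t (i : Int)) (List.nodup_cons.mp hnd).2 h
        (by rw [List.length_set]; exact hlt)

theorem pvDropWhile_ge (arr : List Int) (x : Int) (st : List Nat)
    (h : st.Pairwise (fun a b => arr.getD a 0 ≤ arr.getD b 0)) :
    ∀ t ∈ st.dropWhile (fun t => decide (arr.getD t 0 < x)), x ≤ arr.getD t 0 := by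
  induction st with
  | nil => simp
  | cons t rest ih =>
    rw [List.dropWhile_cons]
    by_cases hp : arr.getD t 0 < x
    · rw [if_pos (by simpa using hp)]
      exact ih (List.pairwise_cons.mp h).2
    · rw [if_neg (by simpa using hp)]
      intro u hu
      rcases List.mem_cons.mp hu with h1 | h1
      · subst h1; omega
      · exact le_trans (le_of_not_gt hp) ((List.pairwise_cons.mp h).1 u h1)

theorem pvInv_step (arr : List Int) (val : Int) (n : Nat) (res : List Int) (st : List Nat)
    (hn : n < arr.length) (hI : pvInv arr val n res st) :
    pvInv arr val (n + 1) (pvPop arr n res st).1 (n :: (pvPop arr n res st).2) := by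
  obtain ⟨hlen, hbnd, hgt, hval, hmem, hstval, hge, hfin⟩ := hI
  rw [pvPop_eq]
  set p : Nat → Bool := fun t => decide (arr.getD t 0 < arr.getD n 0) with hp
  have htds : st.takeWhile p ++ st.dropWhile p = st := List.takeWhile_append_dropWhile
  have hnd : st.Nodup := hgt.imp fun h => by omega
  have htw_mem : ∀ t ∈ st.takeWhile p, t ∈ st := fun t ht => (List.takeWhile_sublist _).subset ht
  have hdw_mem : ∀ t ∈ st.dropWhile p, t ∈ st := fun t ht => (List.dropWhile_sublist _).subset ht
  have htw_p : ∀ t ∈ st.takeWhile p, arr.getD t 0 < arr.getD n 0 := by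
    intro t ht
    have := List.mem_takeWhile_imp ht
    simpa [hp] using this
  have hdw_ge : ∀ t ∈ st.dropWhile p, arr.getD n 0 ≤ arr.getD t 0 := pvDropWhile_ge arr _ st hval
  have hndapp : (st.takeWhile p ++ st.dropWhile p).Nodup := by rw [htds]; exact hnd
  have htwdw : ∀ t ∈ st.takeWhile p, t ∉ st.dropWhile p := by
    intro t ht
    exact fun hdw => (List.nodup_append.mp hndapp).2.2 t ht t hdw rfl
  have hdisj : ∀ t ∈ st.dropWhile p, t ∉ st.takeWhile p := fun t ht h2 => htwdw t h2 ht
  have hbtw : ∀ t ∈ st.takeWhile p, t < n := fun t ht => hbnd t (htw_mem t ht)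
  have hbdw : ∀ t ∈ st.dropWhile p, t < n := fun t ht => hbnd t (hdw_mem t ht)
  have hmemsplit : ∀ j ∈ st, j ∈ st.takeWhile p ∨ j ∈ st.dropWhile p := by
    intro j hj
    rw [← htds] at hj
    exact List.mem_append.mp hj
  refine ⟨by rw [pvSetAll_length]; exact hlen, ?_, ?_, ?_, ?_, ?_, ?_, ?_⟩
  · intro t ht
    rcases List.mem_cons.mp ht with rfl | h
    · omega
    · have := hbdw t h; omega
  · exact List.pairwise_cons.mpr ⟨fun t ht => hbdw t ht, List.Pairwise.sublist (List.dropWhile_sublist _) hgt⟩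
  · exact List.pairwise_cons.mpr ⟨fun t ht => hdw_ge t ht, List.Pairwise.sublist (List.dropWhile_sublist _) hval⟩
  · intro j hj
    constructor
    · intro hjmem k hk1 hk2
      rcases List.mem_cons.mp hjmem with rfl | hjdw
      · exact absurd hk1 (by omega)
      · have h1 := (hmem j (hbdw j hjdw)).mp (hdw_mem j hjdw)
        by_cases hkn : k = n
        · subst hkn; exact hdw_ge j hjdw
        · exact h1 k hk1 (by omega)
    · intro hall
      by_cases hjn : j = n
      · subst hjn; exact List.mem_cons_self
      · have hjn' : j < n := by omega
        have hjst : j ∈ st := (hmem j hjn').mpr (fun k hk1 hk2 => hall k hk1 (by omega))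
        rcases hmemsplit j hjst with htw | hdw
        · have h1 := htw_p j htw
          have h2 := hall n hjn' (by omega)
          omega
        · exact List.mem_cons_of_mem _ hdw
  · intro j hj
    rcases List.mem_cons.mp hj with rfl | hjdw
    · rw [pvSetAll_getD_not_mem _ _ _ _ (fun h => by have := hbtw j h; omega)]
      exact hge j le_rfl hn
    · rw [pvSetAll_getD_not_mem _ _ _ _ (hdisj j hjdw)]
      exact hstval j (hdw_mem j hjdw)
  · intro j hj hjl
    rw [pvSetAll_getD_not_mem _ _ _ _ (fun h => by have := hbtw j h; omega)]
    exact hge j (by omega) hjl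
  · intro j hj hjnot
    have hjn : j ≠ n := fun h => hjnot (h ▸ List.mem_cons_self)
    have hjdw : j ∉ st.dropWhile p := fun h => hjnot (List.mem_cons_of_mem _ h)
    have hjn' : j < n := by omega
    by_cases hjst : j ∈ st
    · have hjtw : j ∈ st.takeWhile p := by
        rcases hmemsplit j hjst with h | h
        · exact h
        · exact absurd h hjdw
      refine ⟨n, hjn', by omega, htw_p j hjtw, ?_, ?_⟩
      · intro m hm1 hm2
        exact (hmem j hjn').mp hjst m hm1 hm2
      · exact pvSetAll_getD_mem _ _ _ _ (List.Sublist.nodup (List.takeWhile_sublist _) hnd)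
          hjtw (by omega)
    · obtain ⟨k, hk1, hk2, hk3, hk4, hk5⟩ := hfin j hjn' hjst
      refine ⟨k, hk1, by omega, hk3, hk4, ?_⟩
      rw [pvSetAll_getD_not_mem _ _ _ _ (fun h => hjst (htw_mem j h))]
      exact hk5

theorem pvInv_holds (arr : List Int) (val : Int) (n : Nat) (hn : n ≤ arr.length) :
    pvInv arr val n (pvNgaState arr val n).1 (pvNgaState arr val n).2 := by
  induction n with
  | zero =>
    refine ⟨by simp [pvNgaState], by simp [pvNgaState], by simp [pvNgaState],
      by simp [pvNgaState], ?_, by simp [pvNgaState], ?_, ?_⟩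
    · intro j hj; omega
    · intro j _ hjl
      simp only [pvNgaState, List.range_zero, List.foldl_nil]
      rw [List.getD_eq_getElem?_getD, List.getElem?_replicate]
      simp [hjl]
    · intro j hj; omega
  | succ n ih =>
    have hn : n < arr.length := by omega
    have hstep := pvInv_step arr val n (pvNgaState arr val n).1 (pvNgaState arr val n).2 hn
      (ih (by omega))
    have heq : pvNgaState arr val (n + 1) =
        ((pvPop arr n (pvNgaState arr val n).1 (pvNgaState arr val n).2).1,
         n :: (pvPop arr n (pvNgaState arr val n).1 (pvNgaState arr val n).2).2) := by
      simp only [pvNgaState, List.range_succ, List.foldl_append, List.foldl_cons, List.foldl_nil]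
    rw [heq]
    exact hstep

theorem pvNga_eq_state (arr : List Int) (val : Int) :
    pvNga arr val = (pvNgaState arr val arr.length).1 := rfl

theorem pvNga_length (arr : List Int) (val : Int) : (pvNga arr val).length = arr.length := by
  rw [pvNga_eq_state]
  exact (pvInv_holds arr val arr.length le_rfl).1

theorem pvNga_getD_noGt (arr : List Int) (val : Int) (j : Nat)
    (hj : j < arr.length) (h : pvNoGtR arr j) : (pvNga arr val).getD j 0 = val := by
  obtain ⟨hlen, hbnd, hgt, hval, hmem, hstval, hge, hfin⟩ := pvInv_holds arr val arr.length le_rfl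
  rw [pvNga_eq_state]
  exact hstval j ((hmem j hj).mpr fun k hk1 hk2 => h k hk1 hk2)

theorem pvNga_getD_first (arr : List Int) (val : Int) (j k : Nat)
    (h : pvIsFirst arr j k) : (pvNga arr val).getD j 0 = (k : Int) := by
  obtain ⟨hjk, hkN, hlt, hmin⟩ := h
  obtain ⟨hlen, hbnd, hgt, hval, hmem, hstval, hge, hfin⟩ := pvInv_holds arr val arr.length le_rfl
  have hj : j < arr.length := by omega
  rw [pvNga_eq_state]
  have hjnot : j ∉ (pvNgaState arr val arr.length).2 := by
    intro hmemj
    have := (hmem j hj).mp hmemj k hjk hkN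
    omega
  obtain ⟨k', hk1, hk2, hk3, hk4, hk5⟩ := hfin j hj hjnot
  have : k = k' := by
    rcases Nat.lt_trichotomy k k' with h1 | h1 | h1
    · have := hk4 k hjk h1; omega
    · exact h1
    · have := hmin k' hk1 h1; omega
  rw [this]
  exact hk5

theorem pvExpandL_noGt (nums : List Int) (v : Int) (l : Nat)
    (h : ∀ m, m < l → nums.getD m 0 ≤ v) : pvExpandL nums v l = 0 := by
  induction l with
  | zero => rfl
  | succ l ih =>
    rw [pvExpandL, if_pos (h l (by omega))]
    exact ih fun m hm => h m (by omega)

theorem pvExpandL_last (nums : List Int) (v : Int) (k l : Nat)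
    (hk : ¬ nums.getD k 0 ≤ v) (hkl : k < l)
    (h : ∀ m, k < m → m < l → nums.getD m 0 ≤ v) : pvExpandL nums v l = k + 1 := by
  induction l with
  | zero => omega
  | succ l ih =>
    by_cases hlk : k = l
    · subst hlk; rw [pvExpandL, if_neg hk]
    · rw [pvExpandL, if_pos (h l (by omega) (by omega))]
      exact ih (by omega) fun m hm1 hm2 => h m hm1 (by omega)

theorem pvExpandR_noGt (nums : List Int) (v : Int) (r : Nat) (hr : r < nums.length)
    (h : ∀ m, r < m → m < nums.length → nums.getD m 0 ≤ v) :
    pvExpandR nums v r = nums.length - 1 := by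
  have key : ∀ d r, nums.length - r = d → r < nums.length →
      (∀ m, r < m → m < nums.length → nums.getD m 0 ≤ v) →
      pvExpandR nums v r = nums.length - 1 := by
    intro d
    induction d with
    | zero => intro r h1 h2 _; omega
    | succ d ih =>
      intro r h1 h2 h3
      rw [pvExpandR]
      by_cases hlt : r + 1 < nums.length
      · rw [dif_pos hlt, if_pos (h3 (r + 1) (by omega) hlt)]
        exact ih (r + 1) (by omega) (by omega) fun m hm1 hm2 => h3 m (by omega) hm2
      · rw [dif_neg hlt]; omega
  exact key _ r rfl hr h

theorem pvExpandR_first (nums : List Int) (v : Int) (r k : Nat)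
    (hk : ¬ nums.getD k 0 ≤ v) (hrk : r < k) (hkN : k < nums.length)
    (h : ∀ m, r < m → m < k → nums.getD m 0 ≤ v) : pvExpandR nums v r = k - 1 := by
  have key : ∀ d r, k - r = d → r < k →
      (∀ m, r < m → m < k → nums.getD m 0 ≤ v) →
      pvExpandR nums v r = k - 1 := by
    intro d
    induction d with
    | zero => intro r h1 h2 _; omega
    | succ d ih =>
      intro r h1 h2 h3
      rw [pvExpandR]
      by_cases hrk : r + 1 = k
      · rw [dif_pos (by omega), if_neg (by rw [hrk]; exact hk)]; omega
      · rw [dif_pos (by omega), if_pos (h3 (r + 1) (by omega) (by omega))]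
        exact ih (r + 1) (by omega) (by omega) fun m hm1 hm2 => h3 m (by omega) hm2
  exact key _ r rfl hrk h

theorem pvRev_getD (l : List Int) (t : Nat) (ht : t < l.length) :
    l.reverse.getD t 0 = l.getD (l.length - 1 - t) 0 := by
  rw [List.getD_eq_getElem?_getD, List.getD_eq_getElem?_getD,
    List.getElem?_eq_getElem (by simpa using ht), List.getElem?_eq_getElem (by omega)]
  simp [List.getElem_reverse]

theorem pvFirst_exists (arr : List Int) (j : Nat) (h : ¬ pvNoGtR arr j) :
    ∃ k, pvIsFirst arr j k := by
  unfold pvNoGtR at h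
  push Not at h
  obtain ⟨k, hk1, hk2, hk3⟩ := h
  have hex : ∃ m, j < m ∧ m < arr.length ∧ arr.getD j 0 < arr.getD m 0 := ⟨k, hk1, hk2, hk3⟩
  have hfl := (Nat.find_spec hex).2.1
  refine ⟨Nat.find hex, (Nat.find_spec hex).1, hfl, (Nat.find_spec hex).2.2, ?_⟩
  intro m hm1 hm2
  by_contra hle
  push Not at hle
  exact Nat.find_min hex hm2 ⟨hm1, by omega, hle⟩

theorem pvLast_exists (arr : List Int) (i : Nat)
    (h : ¬ ∀ k, k < i → arr.getD k 0 ≤ arr.getD i 0) : ∃ k, pvIsLast arr i k := by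
  push Not at h
  obtain ⟨k0, hk0, hgt0⟩ := h
  have hspec : Nat.findGreatest (fun k => k < i ∧ arr.getD i 0 < arr.getD k 0) i < i ∧
      arr.getD i 0 < arr.getD (Nat.findGreatest (fun k => k < i ∧ arr.getD i 0 < arr.getD k 0) i) 0 :=
    Nat.findGreatest_spec (P := fun k => k < i ∧ arr.getD i 0 < arr.getD k 0)
      (Nat.le_of_lt hk0) ⟨hk0, hgt0⟩
  refine ⟨Nat.findGreatest (fun k => k < i ∧ arr.getD i 0 < arr.getD k 0) i,
    hspec.1, hspec.2, ?_⟩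
  intro m hm1 hm2
  by_contra hle
  push Not at hle
  exact (Nat.findGreatest_is_greatest hm1 (by omega)) ⟨hm2, hle⟩

theorem pvBridge_first (nums : List Int) (i k : Nat) (hi : i < nums.length)
    (h : pvIsLast nums i k) :
    pvIsFirst nums.reverse (nums.length - 1 - i) (nums.length - 1 - k) := by
  obtain ⟨hki, hgt, hmid⟩ := h
  have hN : nums.reverse.length = nums.length := List.length_reverse
  have e1 : nums.length - 1 - (nums.length - 1 - i) = i := by omega
  have e2 : nums.length - 1 - (nums.length - 1 - k) = k := by omega
  refine ⟨by omega, by omega, ?_, ?_⟩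
  · rw [pvRev_getD _ _ (by omega), pvRev_getD _ _ (by omega), e1, e2]
    exact hgt
  · intro m hm1 hm2
    rw [pvRev_getD _ _ (by omega), pvRev_getD _ _ (by omega), e1]
    exact hmid (nums.length - 1 - m) (by omega) (by omega)

theorem pvBridge_noGt (nums : List Int) (i : Nat) (hi : i < nums.length)
    (h : ∀ k, k < i → nums.getD k 0 ≤ nums.getD i 0) :
    pvNoGtR nums.reverse (nums.length - 1 - i) := by
  intro k hk1 hk2
  have hN : nums.reverse.length = nums.length := List.length_reverse
  have e1 : nums.length - 1 - (nums.length - 1 - i) = i := by omega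
  rw [pvRev_getD _ _ (by omega), pvRev_getD _ _ (by omega), e1]
  exact h (nums.length - 1 - k) (by omega)

-- ===== VERDICT (by name: the statement is the Claim_ definition above) =====
theorem maximumLengthOfRanges_spec : Claim_equal_maximumLengthOfRanges := by
  unfold Claim_equal_maximumLengthOfRanges Spec_maximumLengthOfRanges
  intro nums _
  show maximumLengthOfRanges nums = maximumLengthOfRanges_alt nums
  simp only [maximumLengthOfRanges, maximumLengthOfRanges_alt,
    PySem.List.slice?_none_none_neg_one, Option.getD_some,
    PySem.List.foldl_append_singleton_eq_map, List.nil_append]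
  refine List.map_congr_left ?_
  intro i hi
  have hiN : i < nums.length := List.mem_range.mp hi
  have hlen0 : (pvNga nums.reverse (-1)).length = nums.length := by
    rw [pvNga_length, List.length_reverse]
  have hrtl0 : ((pvNga nums.reverse (-1)).reverse).getD i 0
      = (pvNga nums.reverse (-1)).getD (nums.length - 1 - i) 0 := by
    have h := pvRev_getD (pvNga nums.reverse (-1)) i (by rw [hlen0]; exact hiN)
    rw [hlen0] at h
    exact h
  rw [PySem.List.getD_map_range _ _ _ _ hiN, hrtl0]
  by_cases hR : pvNoGtR nums i
  · rw [pvNga_getD_noGt nums (nums.length : Int) i hiN hR,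
      pvExpandR_noGt nums (nums.getD i 0) i hiN (fun m hm1 hm2 => hR m hm1 hm2)]
    by_cases hL : ∀ k, k < i → nums.getD k 0 ≤ nums.getD i 0
    · rw [pvNga_getD_noGt nums.reverse (-1) (nums.length - 1 - i)
        (by rw [List.length_reverse]; omega) (pvBridge_noGt nums i hiN hL)]
      rw [if_neg (by omega), pvExpandL_noGt nums (nums.getD i 0) i hL]
      omega
    · obtain ⟨kl, hkl⟩ := pvLast_exists nums i hL
      have hbr := pvBridge_first nums i kl hiN hkl
      rw [pvNga_getD_first nums.reverse (-1) _ _ hbr]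
      rw [if_pos (Int.natCast_nonneg _)]
      obtain ⟨h1, h2, h3⟩ := hkl
      rw [pvExpandL_last nums (nums.getD i 0) kl i (by omega) h1
        (fun m hm1 hm2 => h3 m hm1 hm2)]
      omega
  · obtain ⟨kr, hkr⟩ := pvFirst_exists nums i hR
    rw [pvNga_getD_first nums (nums.length : Int) i kr hkr]
    obtain ⟨h1, h2, h3, h4⟩ := hkr
    rw [pvExpandR_first nums (nums.getD i 0) i kr (by omega) h1 h2
      (fun m hm1 hm2 => h4 m hm1 hm2)]
    by_cases hL : ∀ k, k < i → nums.getD k 0 ≤ nums.getD i 0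
    · rw [pvNga_getD_noGt nums.reverse (-1) (nums.length - 1 - i)
        (by rw [List.length_reverse]; omega) (pvBridge_noGt nums i hiN hL)]
      rw [if_neg (by omega), pvExpandL_noGt nums (nums.getD i 0) i hL]
      omega
    · obtain ⟨kl, hkl⟩ := pvLast_exists nums i hL
      have hbr := pvBridge_first nums i kl hiN hkl
      rw [pvNga_getD_first nums.reverse (-1) _ _ hbr]
      rw [if_pos (Int.natCast_nonneg _)]
      obtain ⟨g1, g2, g3⟩ := hkl
      rw [pvExpandL_last nums (nums.getD i 0) kl i (by omega) g1
        (fun m hm1 hm2 => g3 m hm1 hm2)]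
      omega
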